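-- pv_equiv track=rewrite | github.com/usrKevin/CoPL | assignment1/strhelper.py | remove_excess_spaces
-- ===== SOURCE A (Python) =====
-- def remove_excess_spaces(s:str) -> str:
--     # remove excess spaces
--     while s.count("  ") > 0:
--         s = s.replace("  ", " ")
--     # remove spaces after closing bracket
--     l = list(s)
--     i = 0
--     is_bracket = False
--     while i < len(l):
--         if l[i] == ')':
--             is_bracket = True
--         elif l[i] == ' ':
--             if is_bracket:
--                 l.pop(i)
--                 continue
--         else:
--             is_bracket = False
--         i += 1
--     # remove spaces before opening bracket
--     i = len(l) - 1
--     is_bracket = False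
--     while i >= 0:
--         if l[i] == '(':
--             is_bracket = True
--         elif l[i] == ' ':
--             if is_bracket:
--                 l.pop(i)
--                 continue
--         else:
--             is_bracket = False
--         i -= 1
--     i = 0
--     is_lambda = False
--     while i < len(l):
--         if l[i] == '\\':
--             is_lambda = True
--         elif i+1<len(l) and l[i]+l[i+1] == '  ':
--             if is_lambda:
--                 l.pop(i)
--                 continue
--         else:
--             is_lambda = False
--         i += 1
--     return "".join(l)
-- ===== SOURCE B (Python) =====
-- def remove_excess_spaces(s: str) -> str:
--     # single left-to-right pass; out holds the finished prefix
--     out = []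
--     for c in s:
--         if c == ' ':
--             # collapse runs of spaces and drop a space right after ')'
--             if out and (out[-1] == ' ' or out[-1] == ')'):
--                 continue
--             out.append(' ')
--         else:
--             # drop the space right before '('
--             if c == '(' and out and out[-1] == ' ':
--                 out.pop()
--             out.append(c)
--     return "".join(out)
-- ===== Notes on version B (the rewrite author's own statement) =====
-- stated objective: faster
-- what changed: A repeatedly rewrites the string (a replace loop until no double spaces remain, then three index-and-pop scans over a list); B builds the output in one left-to-right pass, collapsing space runs and dropping spaces adjacent to brackets by looking at the last character emitted.
import Mathlib
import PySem

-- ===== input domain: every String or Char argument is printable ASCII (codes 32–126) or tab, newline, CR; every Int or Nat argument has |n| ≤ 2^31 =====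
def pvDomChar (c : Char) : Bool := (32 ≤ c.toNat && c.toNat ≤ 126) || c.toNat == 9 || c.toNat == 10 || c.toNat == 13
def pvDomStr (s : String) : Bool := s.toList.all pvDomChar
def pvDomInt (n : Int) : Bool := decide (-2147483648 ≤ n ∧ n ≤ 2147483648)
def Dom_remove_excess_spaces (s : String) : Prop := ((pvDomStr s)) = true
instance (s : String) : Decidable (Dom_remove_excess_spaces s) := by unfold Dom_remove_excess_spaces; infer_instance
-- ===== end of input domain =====

-- B is a single left-to-right pass building the output once (same return value as A's
-- repeated replace/pop passes; A mutates nothing observable).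

-- ===== PORT A =====

-- "no double space": no two adjacent ' ' characters (termination helper for phase 1)
def noDS : List Char → Prop
  | a :: b :: r => ¬(a = ' ' ∧ b = ' ') ∧ noDS (b :: r)
  | _ => True

-- one pass of s.replace("  ", " ") at the list level (termination helper)
def repSp : List Char → List Char
  | [] => []
  | [a] => [a]
  | a :: b :: r => if a = ' ' ∧ b = ' ' then ' ' :: repSp r else a :: repSp (b :: r)

theorem repSp_go_eq : ∀ (fuel : Nat) (l acc : List Char), l.length ≤ fuel →
    PySem.Chars.replace.go [' ', ' '] [' '] fuel l acc = acc.reverse ++ repSp l := by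
  intro fuel
  induction fuel with
  | zero =>
    intro l acc h
    have hl : l = [] := by cases l <;> simp_all
    subst hl
    simp [PySem.Chars.replace.go, repSp]
  | succ n ih =>
    intro l acc h
    match l with
    | [] => simp [PySem.Chars.replace.go, repSp]
    | [c] =>
      have : ([' ', ' '] : List Char).isPrefixOf [c] = false := by
        simp [List.isPrefixOf]
      simp only [PySem.Chars.replace.go, this, Bool.false_eq_true, if_false]
      rw [ih [] (c :: acc) (by simp)]
      simp [repSp]
    | a :: b :: t =>
      by_cases hp : a = ' ' ∧ b = ' '
      · obtain ⟨ha, hb⟩ := hp; subst ha; subst hb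
        have hpre : ([' ', ' '] : List Char).isPrefixOf (' ' :: ' ' :: t) = true := by
          simp [List.isPrefixOf]
        simp only [PySem.Chars.replace.go, hpre, if_true, List.length_cons, List.drop_succ_cons,
          List.drop_zero, List.length_nil, List.reverse_cons, List.reverse_nil, List.nil_append]
        rw [show ([' '] ++ acc : List Char) = ' ' :: acc from rfl]
        rw [ih t (' ' :: acc) (by simp at h ⊢; omega)]
        simp [repSp]
      · have hpre : ([' ', ' '] : List Char).isPrefixOf (a :: b :: t) = false := by
          simp [List.isPrefixOf]; intro h1 h2; exact hp ⟨h1.symm, h2.symm⟩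
        simp only [PySem.Chars.replace.go, hpre, Bool.false_eq_true, if_false]
        rw [ih (b :: t) (a :: acc) (by simp at h ⊢; omega)]
        simp [repSp, hp]

theorem two_sp_toList : ("  " : String).toList = [' ', ' '] := by decide

theorem one_sp_toList : (" " : String).toList = [' '] := by decide

theorem count_go_nil : ∀ (sub : List Char) (fuel : Nat) (acc : Nat),
    PySem.Chars.count.go sub fuel [] acc = acc := by
  intro sub fuel acc
  cases fuel <;> simp [PySem.Chars.count.go]

theorem replace_toList (s : String) :
    (PySem.Str.replace s "  " " ").toList = repSp s.toList := by
  simp only [PySem.Str.replace, String.toList_ofList, two_sp_toList, one_sp_toList]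
  rw [PySem.Chars.replace]
  simp only [List.isEmpty_cons, Bool.false_eq_true, if_false]
  rw [repSp_go_eq s.toList.length s.toList [] (le_refl _)]
  simp

theorem count_go_le : ∀ (sub : List Char) (fuel : Nat) (l : List Char) (acc : Nat),
    acc ≤ PySem.Chars.count.go sub fuel l acc := by
  intro sub fuel
  induction fuel with
  | zero => intro l acc; simp [PySem.Chars.count.go]
  | succ n ih =>
    intro l acc
    match l with
    | [] => rw [count_go_nil]
    | c :: t =>
      rw [PySem.Chars.count.go]
      by_cases hp : sub.isPrefixOf (c :: t) = true
      · simp only [hp, if_true]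
        exact le_trans (Nat.le_succ acc) (ih _ _)
      · simp only [hp, if_false]
        exact ih _ _

theorem count_go_eq_iff : ∀ (fuel : Nat) (l : List Char) (acc : Nat), l.length ≤ fuel →
    (PySem.Chars.count.go [' ', ' '] fuel l acc = acc ↔ noDS l) := by
  intro fuel
  induction fuel with
  | zero =>
    intro l acc h
    have hl : l = [] := by cases l <;> simp_all
    subst hl
    simp [count_go_nil, noDS]
  | succ n ih =>
    intro l acc h
    match l with
    | [] => simp [count_go_nil, noDS]
    | [c] =>
      have : ([' ', ' '] : List Char).isPrefixOf [c] = false := by simp [List.isPrefixOf]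
      rw [PySem.Chars.count.go]
      simp only [this, Bool.false_eq_true, if_false]
      rw [ih [] acc (by simp)]
      simp [noDS]
    | a :: b :: t =>
      by_cases hp : a = ' ' ∧ b = ' '
      · obtain ⟨ha, hb⟩ := hp; subst ha; subst hb
        have hpre : ([' ', ' '] : List Char).isPrefixOf (' ' :: ' ' :: t) = true := by
          simp [List.isPrefixOf]
        rw [PySem.Chars.count.go]
        simp only [hpre, if_true]
        have hle := count_go_le [' ', ' '] n (List.drop ([' ', ' '] : List Char).length (' ' :: ' ' :: t)) (acc + 1)
        constructor
        · intro hgo; omega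
        · intro hn; simp [noDS] at hn
      · have hpre : ([' ', ' '] : List Char).isPrefixOf (a :: b :: t) = false := by
          simp [List.isPrefixOf]; intro h1 h2; exact hp ⟨h1.symm, h2.symm⟩
        rw [PySem.Chars.count.go]
        simp only [hpre, Bool.false_eq_true, if_false]
        rw [ih (b :: t) acc (by simp at h ⊢; omega)]
        simp [noDS, hp]

theorem count_eq_zero_iff (s : String) : PySem.Str.count s "  " = 0 ↔ noDS s.toList := by
  rw [PySem.Str.count, two_sp_toList, PySem.Chars.count]
  simp only [List.isEmpty_cons, Bool.false_eq_true, if_false]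
  exact count_go_eq_iff s.toList.length s.toList 0 (le_refl _)

theorem repSp_length_le : ∀ l : List Char, (repSp l).length ≤ l.length := by
  intro l
  induction l using repSp.induct with
  | case1 => simp [repSp]
  | case2 a => simp [repSp]
  | case3 a b r hp ih => simp only [repSp, if_pos hp, List.length_cons]; omega
  | case4 a b r hp ih =>
    simp only [repSp, if_neg hp, List.length_cons]
    simp only [List.length_cons] at ih
    omega

theorem repSp_length_lt : ∀ l : List Char, ¬ noDS l → (repSp l).length < l.length := by
  intro l
  induction l using repSp.induct with
  | case1 => simp [noDS]
  | case2 a => simp [noDS]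
  | case3 a b r hp ih =>
    intro _
    have := repSp_length_le r
    simp only [repSp, if_pos hp, List.length_cons]
    omega
  | case4 a b r hp ih =>
    intro hn
    have : ¬ noDS (b :: r) := by simp [noDS, hp] at hn ⊢; exact hn
    have h2 := ih this
    simp only [repSp, if_neg hp, List.length_cons]
    simp only [List.length_cons] at h2
    omega

-- while s.count("  ") > 0: s = s.replace("  ", " ")
def phase1 (s : String) : String :=
  if 0 < PySem.Str.count s "  " then phase1 (PySem.Str.replace s "  " " ") else s
termination_by s.toList.length
decreasing_by
  rw [replace_toList]
  exact repSp_length_lt _ (fun h => by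
    have := (count_eq_zero_iff s).mpr h; omega)

-- second while loop: remove spaces after ')' (l.pop(i) = List.eraseIdx, index in range)
def loopA2 (l : List Char) (i : Nat) (flag : Bool) : List Char :=
  if h : i < l.length then
    if l[i] = ')' then loopA2 l (i + 1) true
    else if l[i] = ' ' then
      (if flag then loopA2 (l.eraseIdx i) i flag else loopA2 l (i + 1) flag)
    else loopA2 l (i + 1) false
  else l
termination_by l.length - i
decreasing_by
  · omega
  · simp [List.length_eraseIdx, h]; omega
  · omega
  · omega

-- third while loop: remove spaces before '(' , scanning right to left
-- (the inner index guard only totalises the function; the Python loop never indexes out of range)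
def loopA3 (l : List Char) (i : Int) (flag : Bool) : List Char :=
  if h0 : 0 ≤ i then
    if h : i.toNat < l.length then
      if l[i.toNat] = '(' then loopA3 l (i - 1) true
      else if l[i.toNat] = ' ' then
        (if flag then loopA3 (l.eraseIdx i.toNat) i flag else loopA3 l (i - 1) flag)
      else loopA3 l (i - 1) false
    else l
  else l
termination_by (i + 1).toNat + l.length
decreasing_by
  · omega
  · simp [List.length_eraseIdx, h]; omega
  · omega
  · omega

-- fourth while loop (is_lambda); l[i]+l[i+1] == '  ' means both characters are ' '
def loopA4 (l : List Char) (i : Nat) (flag : Bool) : List Char :=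
  if h : i < l.length then
    if l[i] = '\\' then loopA4 l (i + 1) true
    else if h2 : i + 1 < l.length ∧ l[i] = ' ' ∧ l[i + 1]! = ' ' then
      (if flag then loopA4 (l.eraseIdx i) i flag else loopA4 l (i + 1) flag)
    else loopA4 l (i + 1) false
  else l
termination_by l.length - i
decreasing_by
  · omega
  · simp [List.length_eraseIdx, h]; omega
  · omega
  · omega

def remove_excess_spaces (s : String) : String :=
  let l := (phase1 s).toList                                -- l = list(s)
  let l2 := loopA2 l 0 false
  let l3 := loopA3 l2 ((l2.length : Int) - 1) false
  let l4 := loopA4 l3 0 false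
  String.ofList l4                                          -- "".join(l)

-- ===== PORT B =====

-- loop body of Source B; out is the output built so far (Python appends at the end)
def altStep (out : List Char) (c : Char) : List Char :=
  if c = ' ' then
    if out ≠ [] ∧ (out.getLast? = some ' ' ∨ out.getLast? = some ')') then out
    else out ++ [' ']
  else
    let out' := if c = '(' ∧ out.getLast? = some ' ' then out.dropLast else out
    out' ++ [c]

def remove_excess_spaces_alt (s : String) : String :=
  String.ofList (s.toList.foldl altStep [])                 -- "".join(out)

-- ===== PRECONDITION & SPEC =====
def Spec_remove_excess_spaces (s : String) (out : String) : Prop := out = remove_excess_spaces_alt s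
instance (s : String) (out : String) : Decidable (Spec_remove_excess_spaces s out) := by unfold Spec_remove_excess_spaces; infer_instance

-- ===== CLAIM (what is proved, stated in full; the proofs are below) =====
def Claim_equal_remove_excess_spaces : Prop := ∀ (s : String), Dom_remove_excess_spaces s → Spec_remove_excess_spaces s (remove_excess_spaces s)

-- ===== LEMMAS AND PROOFS =====

-- result of phase 1: maximal space runs collapsed to one space
def collapse : List Char → List Char
  | [] => []
  | [a] => [a]
  | a :: b :: r => if a = ' ' ∧ b = ' ' then collapse (b :: r) else a :: collapse (b :: r)

-- spec of loop 2 (flag = is_bracket)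
def f2 : Bool → List Char → List Char
  | _, [] => []
  | flag, c :: r =>
    if c = ')' then c :: f2 true r
    else if c = ' ' then (if flag then f2 true r else ' ' :: f2 false r)
    else c :: f2 false r

-- value of is_bracket after scanning m starting from flag
def endF (flag : Bool) (m : List Char) : Bool :=
  m.foldl (fun f ch => if ch = ')' then true else if ch = ' ' then f else false) flag

-- spec of loop 3 as a right fold
def step3 (c : Char) (acc : List Char) : List Char :=
  if c = ' ' ∧ acc.head? = some '(' then acc else c :: acc

def W (k : List Char) : List Char := k.foldr step3 []

-- spec of loop 4 (flag = is_lambda)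
def f4 : Bool → List Char → List Char
  | _, [] => []
  | flag, c :: r =>
    if c = '\\' then c :: f4 true r
    else if c = ' ' ∧ r.head? = some ' ' then (if flag then f4 true r else c :: f4 false r)
    else c :: f4 false r

theorem noDS_tail : ∀ (a : Char) (l : List Char), noDS (a :: l) → noDS l := by
  intro a l h
  cases l with
  | nil => trivial
  | cons b r => exact h.2

theorem repSp_cons_head : ∀ (b : Char) (r : List Char), ∃ t, repSp (b :: r) = b :: t := by
  intro b r
  cases r with
  | nil => exact ⟨[], rfl⟩
  | cons c r' =>
    by_cases hp : b = ' ' ∧ c = ' '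
    · exact ⟨repSp r', by simp [repSp, hp, hp.1]⟩
    · exact ⟨repSp (c :: r'), by simp [repSp, hp]⟩

theorem collapse_cons_head : ∀ (b : Char) (r : List Char), ∃ t, collapse (b :: r) = b :: t := by
  intro b r
  induction r generalizing b with
  | nil => exact ⟨[], rfl⟩
  | cons c r' ih =>
    by_cases hp : b = ' ' ∧ c = ' '
    · obtain ⟨t, ht⟩ := ih c
      exact ⟨t, by rw [show collapse (b :: c :: r') = collapse (c :: r') from by simp [collapse, hp], ht, hp.1, hp.2]⟩
    · exact ⟨collapse (c :: r'), by simp [collapse, hp]⟩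

theorem noDS_collapse : ∀ l : List Char, noDS (collapse l) := by
  intro l
  induction l using collapse.induct with
  | case1 => trivial
  | case2 a => trivial
  | case3 a b r hp ih => simpa [collapse, hp] using ih
  | case4 a b r hp ih =>
    obtain ⟨t, ht⟩ := collapse_cons_head b r
    rw [show collapse (a :: b :: r) = a :: collapse (b :: r) from by simp [collapse, hp], ht]
    exact ⟨fun hc => hp hc, ht ▸ ih⟩

theorem collapse_eq_self : ∀ l : List Char, noDS l → collapse l = l := by
  intro l
  induction l using collapse.induct with
  | case1 => intro _; rfl
  | case2 a => intro _; rfl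
  | case3 a b r hp ih => intro h; exact absurd hp h.1
  | case4 a b r hp ih =>
    intro h
    rw [show collapse (a :: b :: r) = a :: collapse (b :: r) from by simp [collapse, hp], ih h.2]

theorem collapse_rep : ∀ l : List Char,
    collapse (repSp l) = collapse l ∧ collapse (' ' :: repSp l) = collapse (' ' :: l) := by
  intro l
  induction l using repSp.induct with
  | case1 => exact ⟨rfl, rfl⟩
  | case2 a => exact ⟨rfl, rfl⟩
  | case3 a b r hp ih =>
    obtain ⟨ha, hb⟩ := hp; subst ha; subst hb
    constructor
    · rw [show repSp (' ' :: ' ' :: r) = ' ' :: repSp r from by simp [repSp], ih.2,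
        show collapse (' ' :: ' ' :: r) = collapse (' ' :: r) from by simp [collapse]]
    · rw [show repSp (' ' :: ' ' :: r) = ' ' :: repSp r from by simp [repSp],
        show collapse (' ' :: ' ' :: repSp r) = collapse (' ' :: repSp r) from by simp [collapse],
        ih.2,
        show collapse (' ' :: ' ' :: ' ' :: r) = collapse (' ' :: ' ' :: r) from by simp [collapse],
        show collapse (' ' :: ' ' :: r) = collapse (' ' :: r) from by simp [collapse]]
  | case4 a b r hp ih =>
    obtain ⟨t, ht⟩ := repSp_cons_head b r
    have hrep : repSp (a :: b :: r) = a :: repSp (b :: r) := by simp [repSp, hp]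
    have part1 : collapse (repSp (a :: b :: r)) = collapse (a :: b :: r) := by
      rw [hrep, ht,
        show collapse (a :: b :: t) = if a = ' ' ∧ b = ' ' then collapse (b :: t) else a :: collapse (b :: t) from rfl,
        if_neg hp, ← ht, ih.1,
        show collapse (a :: b :: r) = a :: collapse (b :: r) from by simp [collapse, hp]]
    refine ⟨part1, ?_⟩
    by_cases ha : a = ' '
    · subst ha
      rw [hrep,
        show collapse (' ' :: ' ' :: repSp (b :: r)) = collapse (' ' :: repSp (b :: r)) from by simp [collapse],
        ih.2,
        show collapse (' ' :: ' ' :: b :: r) = collapse (' ' :: b :: r) from by simp [collapse]]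
    · rw [hrep, ht,
        show collapse (' ' :: a :: b :: t) = ' ' :: collapse (a :: b :: t) from by simp [collapse, ha],
        show collapse (a :: b :: t) = if a = ' ' ∧ b = ' ' then collapse (b :: t) else a :: collapse (b :: t) from rfl,
        if_neg hp, ← ht, ih.1,
        show collapse (' ' :: a :: b :: r) = ' ' :: collapse (a :: b :: r) from by simp [collapse, ha],
        show collapse (a :: b :: r) = a :: collapse (b :: r) from by simp [collapse, hp]]

theorem pv_getLast?_cons (a : Char) (l : List Char) (h : l ≠ []) :
    (a :: l).getLast? = l.getLast? := by
  cases l with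
  | nil => exact absurd rfl h
  | cons b t => simp [List.getLast?_cons_cons]

theorem collapse_append : ∀ (p : List Char) (c : Char),
    collapse (p ++ [c]) =
      if (collapse p).getLast? = some ' ' ∧ c = ' ' then collapse p else collapse p ++ [c] := by
  intro p
  induction p using collapse.induct with
  | case1 => intro c; simp [collapse]
  | case2 a =>
    intro c
    by_cases hp : a = ' ' ∧ c = ' '
    · obtain ⟨ha, hc⟩ := hp; subst ha; subst hc; simp [collapse]
    · rw [show ([a] : List Char) ++ [c] = [a, c] from rfl,
        show collapse [a, c] = if a = ' ' ∧ c = ' ' then collapse [c] else a :: collapse [c] from rfl,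
        if_neg hp]
      simp [collapse]
      intro h1 h2
      exact absurd ⟨h1, h2⟩ hp
  | case3 a b r hp ih =>
    intro c
    obtain ⟨ha, hb⟩ := hp; subst ha; subst hb
    have ih' := ih c
    rw [show (' ' :: r) ++ [c] = ' ' :: (r ++ [c]) from rfl] at ih'
    rw [show (' ' :: ' ' :: r) ++ [c] = ' ' :: ' ' :: (r ++ [c]) from rfl,
      show collapse (' ' :: ' ' :: (r ++ [c])) = collapse (' ' :: (r ++ [c])) from by simp [collapse],
      ih', show collapse (' ' :: ' ' :: r) = collapse (' ' :: r) from by simp [collapse]]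
  | case4 a b r hp ih =>
    intro c
    obtain ⟨t, ht⟩ := collapse_cons_head b r
    have hbt : collapse (b :: r) ≠ [] := by simp [ht]
    have hc4 : collapse (a :: b :: r) = a :: collapse (b :: r) := by simp [collapse, hp]
    rw [show (a :: b :: r) ++ [c] = a :: ((b :: r) ++ [c]) from rfl]
    have hcons : collapse (a :: ((b :: r) ++ [c])) = a :: collapse ((b :: r) ++ [c]) := by
      rw [show (b :: r) ++ [c] = b :: (r ++ [c]) from rfl]
      simp [collapse, hp]
    rw [hcons, ih c, hc4, pv_getLast?_cons a _ hbt]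
    by_cases hcond : (collapse (b :: r)).getLast? = some ' ' ∧ c = ' '
    · rw [if_pos hcond, if_pos hcond]
    · rw [if_neg hcond, if_neg hcond]; rfl

theorem phase1_toList (s : String) : (phase1 s).toList = collapse s.toList := by
  induction s using phase1.induct with
  | case1 s h ih =>
    rw [phase1, if_pos h, ih, replace_toList, (collapse_rep s.toList).1]
  | case2 s h =>
    rw [phase1, if_neg h]
    have : noDS s.toList := (count_eq_zero_iff s).mp (by omega)
    rw [collapse_eq_self _ this]

theorem take_erase (l : List Char) (i : Nat) (h : i < l.length) :
    (l.eraseIdx i).take i = l.take i := by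
  rw [List.eraseIdx_eq_take_drop_succ,
    List.take_append_of_le_length (by rw [List.length_take]; omega), List.take_take]
  simp

theorem drop_erase (l : List Char) (i : Nat) (h : i < l.length) :
    (l.eraseIdx i).drop i = l.drop (i + 1) := by
  rw [List.eraseIdx_eq_take_drop_succ,
    List.drop_append_of_le_length (by rw [List.length_take]; omega),
    List.drop_of_length_le (by rw [List.length_take]; omega)]
  simp

theorem loopA2_eq : ∀ (l : List Char) (i : Nat) (flag : Bool),
    loopA2 l i flag = l.take i ++ f2 flag (l.drop i) := by
  intro l i flag
  induction l, i, flag using loopA2.induct with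
  | case1 l i flag h hc ih =>
    rw [loopA2]
    simp only [dif_pos h, if_pos hc]
    rw [ih, List.take_succ_eq_append_getElem h, ← List.getElem_cons_drop h]
    simp [f2, hc]
  | case2 l i h hc hsp ih =>
    rw [loopA2]
    simp only [dif_pos h, if_neg hc, if_pos hsp, if_pos rfl]
    rw [ih, take_erase l i h, drop_erase l i h, ← List.getElem_cons_drop h]
    simp [f2, hc, hsp]
  | case3 l i flag h hc hsp hf ih =>
    simp only [Bool.not_eq_true] at hf; subst hf
    rw [loopA2]
    simp only [dif_pos h, if_neg hc, if_pos hsp, Bool.false_eq_true, if_neg (by simp : ¬False)]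
    rw [ih, List.take_succ_eq_append_getElem h, ← List.getElem_cons_drop h]
    simp [f2, hc, hsp]
  | case4 l i flag h hc hsp ih =>
    rw [loopA2]
    simp only [dif_pos h, if_neg hc, if_neg hsp]
    have hstep : f2 flag (l.drop i) = l[i] :: f2 false (l.drop (i + 1)) := by
      rw [← List.getElem_cons_drop h]; simp [f2, hc, hsp]
    rw [ih, hstep, List.take_succ_eq_append_getElem h, List.append_assoc]
    rfl
  | case5 l i flag h =>
    rw [loopA2]
    simp only [dif_neg h]
    rw [List.drop_of_length_le (by omega), List.take_of_length_le (by omega)]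
    simp [f2]

theorem f2_append : ∀ (m : List Char) (flag : Bool) (c : Char),
    f2 flag (m ++ [c]) = f2 flag m ++ (if c = ' ' ∧ endF flag m then [] else [c]) := by
  intro m
  induction m with
  | nil =>
    intro flag c
    by_cases hc : c = ')'
    · subst hc; simp [f2, endF]
    · by_cases hs : c = ' '
      · subst hs; cases flag <;> simp [f2, endF]
      · simp [f2, endF, hc, hs]
  | cons a m' ih =>
    intro flag c
    rw [List.cons_append]
    by_cases ha : a = ')'
    · subst ha
      have h1 : ∀ fl r, f2 fl (')' :: r) = ')' :: f2 true r := by intro fl r; simp [f2]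
      rw [h1, h1, ih true, show endF flag (')' :: m') = endF true m' from by simp [endF]]
      simp
    · by_cases hs : a = ' '
      · subst hs
        cases flag with
        | true =>
          have h1 : ∀ r, f2 true (' ' :: r) = f2 true r := by intro r; simp [f2, ha]
          rw [h1, h1, ih true, show endF true (' ' :: m') = endF true m' from by simp [endF]]
        | false =>
          have h1 : ∀ r, f2 false (' ' :: r) = ' ' :: f2 false r := by intro r; simp [f2, ha]
          rw [h1, h1, ih false, show endF false (' ' :: m') = endF false m' from by simp [endF]]
          simp
      · have h1 : ∀ fl r, f2 fl (a :: r) = a :: f2 false r := by intro fl r; simp [f2, ha, hs]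
        rw [h1, h1, ih false, show endF flag (a :: m') = endF false m' from by simp [endF, ha, hs]]
        simp

theorem endF_last : ∀ (m : List Char) (flag : Bool) (y : Char), m.getLast? = some y → y ≠ ' ' →
    endF flag m = decide (y = ')') := by
  intro m flag y hy hne
  obtain ⟨m', rfl⟩ := List.getLast?_eq_some_iff.mp hy
  by_cases hy' : y = ')' <;> simp [endF, List.foldl_append, hy', hne]

theorem f2_last : ∀ (m : List Char) (flag : Bool) (x : Char), x ≠ ' ' → m.getLast? = some x →
    (f2 flag m).getLast? = some x := by
  intro m flag x hx hm
  obtain ⟨m', rfl⟩ := List.getLast?_eq_some_iff.mp hm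
  rw [f2_append, if_neg (fun hcon => hx hcon.1)]
  exact List.getLast?_concat

theorem f2_head : ∀ (m : List Char) (flag : Bool), noDS m →
    (f2 flag m).head? = m.head? ∨
      (flag = true ∧ m.head? = some ' ' ∧ (f2 flag m).head? = m.tail.head?) := by
  intro m flag hm
  cases m with
  | nil => left; rfl
  | cons c r =>
    by_cases hc : c = ')'
    · left; simp [f2, hc]
    · by_cases hs : c = ' '
      · cases flag with
        | false => left; simp [f2, hc, hs]
        | true =>
          right
          refine ⟨rfl, by simp [hs], ?_⟩
          subst hs
          rw [show f2 true (' ' :: r) = f2 true r from by simp [f2, hc]]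
          cases r with
          | nil => rfl
          | cons d r' =>
            have hd : d ≠ ' ' := fun hh => hm.1 ⟨rfl, hh⟩
            by_cases hdp : d = ')' <;> simp [f2, hdp, hd]
      · left; simp [f2, hc, hs]

theorem noDS_cons (c : Char) (l : List Char) (h : noDS l) (hh : c ≠ ' ' ∨ l.head? ≠ some ' ') :
    noDS (c :: l) := by
  cases l with
  | nil => trivial
  | cons b t =>
    refine ⟨?_, h⟩
    rintro ⟨h1, h2⟩
    rcases hh with hh | hh
    · exact hh h1
    · exact hh (by simp [h2])

theorem noDS_f2 : ∀ (m : List Char) (flag : Bool), noDS m → noDS (f2 flag m) := by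
  intro m
  induction m with
  | nil => intro flag _; trivial
  | cons c r ih =>
    intro flag h
    have hr := noDS_tail c r h
    by_cases hc : c = ')'
    · rw [show f2 flag (c :: r) = c :: f2 true r from by simp [f2, hc]]
      exact noDS_cons c _ (ih true hr) (Or.inl (by simp [hc]))
    · by_cases hs : c = ' '
      · cases flag with
        | true =>
          rw [show f2 true (c :: r) = f2 true r from by simp [f2, hc, hs]]
          exact ih true hr
        | false =>
          rw [show f2 false (c :: r) = c :: f2 false r from by simp [f2, hc, hs]]
          refine noDS_cons c _ (ih false hr) (Or.inr ?_)
          rcases f2_head r false hr with hh | hh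
          · rw [hh]
            cases r with
            | nil => simp
            | cons d t =>
              have hd : d ≠ ' ' := fun hdd => h.1 ⟨hs, hdd⟩
              simp [hd]
          · exact absurd hh.1 (by simp)
      · rw [show f2 flag (c :: r) = c :: f2 false r from by simp [f2, hc, hs]]
        exact noDS_cons c _ (ih false hr) (Or.inl hs)

theorem W_cons (x : Char) (k : List Char) : W (x :: k) = step3 x (W k) := rfl

theorem W_head : ∀ k : List Char, (W k).head? = k.head? ∨ (W k).head? = some '(' := by
  intro k
  cases k with
  | nil => left; rfl
  | cons x k' =>
    rw [W_cons]
    by_cases hcond : x = ' ' ∧ (W k').head? = some '('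
    · right; rw [step3, if_pos hcond]; exact hcond.2
    · left; rw [step3, if_neg hcond]; rfl

theorem W_append_ne : ∀ (k : List Char) (c : Char), c ≠ '(' → W (k ++ [c]) = W k ++ [c] := by
  intro k c hc
  induction k with
  | nil => simp [W, step3, hc]
  | cons x k' ih =>
    rw [List.cons_append, W_cons, ih, W_cons]
    cases hW : W k' with
    | nil => simp [step3, hc]
    | cons h t =>
      by_cases hcond : x = ' ' ∧ h = '('
      · rw [step3, if_pos (by simp [hcond.1, hcond.2]), step3, if_pos (by simp [hcond.1, hcond.2])]
      · have hn1 : ¬(x = ' ' ∧ ((h :: t) ++ [c]).head? = some '(') := by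
          simp only [List.cons_append, List.head?_cons, Option.some.injEq]
          rintro ⟨h1, h2⟩; exact hcond ⟨h1, h2⟩
        have hn2 : ¬(x = ' ' ∧ (h :: t).head? = some '(') := by
          simp only [List.head?_cons, Option.some.injEq]
          rintro ⟨h1, h2⟩; exact hcond ⟨h1, h2⟩
        rw [step3, if_neg hn1, step3, if_neg hn2]
        rfl

theorem W_append_paren : ∀ k : List Char, noDS k →
    W (k ++ ['(']) =
      (if (W k).getLast? = some ' ' then (W k).dropLast else W k) ++ ['('] := by
  intro k
  induction k with
  | nil => intro _; simp [W, step3]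
  | cons x k' ih =>
    intro h
    have hk' := noDS_tail x k' h
    rw [List.cons_append, W_cons, W_cons, ih hk']
    cases hW : W k' with
    | nil =>
      rw [show (if ([] : List Char).getLast? = some ' ' then ([] : List Char).dropLast
          else ([] : List Char)) = [] from by simp]
      simp only [List.nil_append]
      by_cases hx : x = ' '
      · subst hx
        rw [show step3 ' ' ['('] = ['('] from by simp [step3],
          show step3 ' ' ([] : List Char) = [' '] from by simp [step3]]
        simp
      · rw [show step3 x ['('] = [x, '('] from by simp [step3, hx],
          show step3 x ([] : List Char) = [x] from by simp [step3]]
        simp [hx]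
    | cons hh tt =>
      set T := (if (hh :: tt).getLast? = some ' ' then (hh :: tt).dropLast else (hh :: tt)) with hT
      by_cases hx : x = ' '
      · by_cases hTn : T = []
        · exfalso
          have hht : hh = ' ' ∧ tt = [] := by
            by_cases hgl : (hh :: tt).getLast? = some ' '
            · rw [hT, if_pos hgl] at hTn
              have htt : tt = [] := by
                have := congrArg List.length hTn
                simp [List.length_dropLast] at this
                cases tt with
                | nil => rfl
                | cons b bt => simp at this
              subst htt
              simp at hgl
              exact ⟨hgl, rfl⟩
            · rw [hT, if_neg hgl] at hTn
              exact absurd hTn (by simp)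
          obtain ⟨h1, h2⟩ := hht
          subst h1; subst h2
          cases k' with
          | nil => simp [W] at hW
          | cons d t =>
            rcases W_head (d :: t) with hWh | hWh
            · rw [hW] at hWh
              simp only [List.head?_cons, Option.some.injEq] at hWh
              exact h.1 ⟨hx, hWh.symm⟩
            · rw [hW] at hWh
              simp at hWh
        · by_cases hTh : T.head? = some '('
          · have hTne : (T ++ ['(']).head? = some '(' := by
              cases hTc : T with
              | nil => exact absurd hTc hTn
              | cons a t => rw [hTc] at hTh; simpa using hTh
            rw [show step3 x (T ++ ['(']) = T ++ ['('] from by rw [step3, if_pos ⟨hx, hTne⟩]]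
            have hhh : hh = '(' := by
              rw [hT] at hTh
              by_cases hgl : (hh :: tt).getLast? = some ' '
              · rw [if_pos hgl] at hTh
                cases tt with
                | nil => exact absurd (by rw [hT, if_pos hgl]; rfl) hTn
                | cons b bt =>
                  rw [List.dropLast_cons_of_ne_nil (by simp)] at hTh
                  simpa using hTh
              · rw [if_neg hgl] at hTh
                simpa using hTh
            subst hx; subst hhh
            rw [show step3 ' ' ('(' :: tt) = '(' :: tt from by simp [step3], hT]
          · have hhne : hh ≠ '(' := by
              intro hcon
              subst hcon
              apply hTh
              rw [hT]
              by_cases hgl : (('(' : Char) :: tt).getLast? = some ' '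
              · rw [if_pos hgl]
                cases tt with
                | nil => exact absurd (by rw [hT, if_pos hgl]; rfl) hTn
                | cons b bt => rw [List.dropLast_cons_of_ne_nil (by simp)]; rfl
              · rw [if_neg hgl]; rfl
            have hTne : ¬ (x = ' ' ∧ (T ++ ['(']).head? = some '(') := by
              rintro ⟨-, hcon⟩
              cases hTc : T with
              | nil => exact absurd hTc hTn
              | cons a t =>
                rw [hTc] at hcon hTh
                simp only [List.cons_append, List.head?_cons] at hcon
                exact hTh hcon
            have hstep2 : step3 x (hh :: tt) = x :: hh :: tt := by
              rw [step3, if_neg]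
              rintro ⟨-, hcon⟩
              simp only [List.head?_cons, Option.some.injEq] at hcon
              exact hhne hcon
            rw [show step3 x (T ++ ['(']) = x :: (T ++ ['(']) from by rw [step3, if_neg hTne],
              hstep2, pv_getLast?_cons x (hh :: tt) (by simp), hT]
            by_cases hgl : (hh :: tt).getLast? = some ' '
            · rw [if_pos hgl, if_pos hgl,
                show (x :: hh :: tt).dropLast = x :: (hh :: tt).dropLast from
                  List.dropLast_cons_of_ne_nil (by simp)]
              rfl
            · rw [if_neg hgl, if_neg hgl]
              rfl
      · rw [show step3 x (T ++ ['(']) = x :: (T ++ ['(']) from by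
            rw [step3, if_neg (fun hcon => hx hcon.1)],
          show step3 x (hh :: tt) = x :: hh :: tt from by
            rw [step3, if_neg (fun hcon => hx hcon.1)],
          pv_getLast?_cons x (hh :: tt) (by simp), hT]
        by_cases hgl : (hh :: tt).getLast? = some ' '
        · rw [if_pos hgl, if_pos hgl,
            show (x :: hh :: tt).dropLast = x :: (hh :: tt).dropLast from
              List.dropLast_cons_of_ne_nil (by simp)]
          rfl
        · rw [if_neg hgl, if_neg hgl]
          rfl

theorem W_paren_end : ∀ k : List Char, ∃ u, W (k ++ ['(']) = u ++ ['('] := by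
  intro k
  induction k with
  | nil => exact ⟨[], by simp [W, step3]⟩
  | cons x k' ih =>
    obtain ⟨u, hu⟩ := ih
    rw [List.cons_append, W_cons, hu]
    by_cases hcond : x = ' ' ∧ (u ++ ['(']).head? = some '('
    · exact ⟨u, by rw [step3, if_pos hcond]⟩
    · exact ⟨x :: u, by rw [step3, if_neg hcond]; rfl⟩

theorem W_last : ∀ (k : List Char) (x : Char), x ≠ ' ' → k.getLast? = some x →
    (W k).getLast? = some x := by
  intro k x hx hk
  obtain ⟨k', rfl⟩ := List.getLast?_eq_some_iff.mp hk
  by_cases hxp : x = '('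
  · subst hxp
    obtain ⟨u, hu⟩ := W_paren_end k'
    rw [hu]
    exact List.getLast?_concat
  · rw [W_append_ne k' x hxp]
    exact List.getLast?_concat

theorem noDS_W : ∀ k : List Char, noDS k → noDS (W k) := by
  intro k
  induction k with
  | nil => intro _; trivial
  | cons x k' ih =>
    intro h
    have hk' := noDS_tail x k' h
    rw [W_cons]
    by_cases hcond : x = ' ' ∧ (W k').head? = some '('
    · rw [step3, if_pos hcond]
      exact ih hk'
    · rw [step3, if_neg hcond]
      refine noDS_cons x _ (ih hk') ?_
      by_cases hx : x = ' '
      · right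
        rcases W_head k' with hh | hh
        · rw [hh]
          cases k' with
          | nil => simp
          | cons d t =>
            have hd : d ≠ ' ' := fun hdd => h.1 ⟨hx, hdd⟩
            simp [hd]
        · rw [hh]; simp
      · left; exact hx

theorem loopA3_eq : ∀ (N n : Nat) (l : List Char) (flag : Bool), n + l.length ≤ N →
    n ≤ l.length →
    ((flag = decide ((l.drop n).head? = some '(')) ∨
      (flag = true ∧ 0 < n ∧ l[n - 1]? = some '(')) →
    loopA3 l ((n : Int) - 1) flag = (l.take n).foldr step3 (l.drop n) := by
  intro N
  induction N with
  | zero =>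
    intro n l flag hN hn hInv
    have hn0 : n = 0 := by omega
    subst hn0
    rw [loopA3, dif_neg (by omega)]
    simp
  | succ N ihN =>
    intro n l flag hN hn hInv
    match n with
    | 0 =>
      rw [loopA3, dif_neg (by omega)]
      simp
    | Nat.succ m =>
      simp only [Nat.succ_eq_add_one] at hN hn hInv ⊢
      have hcast : ((m + 1 : Nat) : Int) - 1 = (m : Int) := by push_cast; ring
      have h : m < l.length := by omega
      rw [hcast, loopA3, dif_pos (by positivity), dif_pos (by simpa using h)]
      have htoNat : (m : Int).toNat = m := by simp
      rw [List.take_succ_eq_append_getElem h, List.foldr_append]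
      simp only [List.foldr_cons, List.foldr_nil, htoNat]
      by_cases hpar : l[m] = '('
      · rw [if_pos hpar]
        have ih := ihN m l true (by omega) (by omega) (Or.inl (by
          rw [List.head?_drop, List.getElem?_eq_getElem h, hpar]; simp))
        rw [ih]
        have hdm : l.drop m = '(' :: l.drop (m + 1) := by
          rw [← hpar]; exact (List.getElem_cons_drop h).symm
        rw [hpar, show step3 '(' (l.drop (m + 1)) = '(' :: l.drop (m + 1) from by simp [step3],
          ← hdm]
      · rw [if_neg hpar]
        by_cases hsp : l[m] = ' '
        · rw [if_pos hsp]
          cases hfl : flag with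
          | false =>
            rw [if_neg (by simp)]
            subst hfl
            have hnd : ¬ (l.drop (m + 1)).head? = some '(' := by
              rcases hInv with hI | hI
              · intro hcon; rw [hcon] at hI; simp at hI
              · exact absurd hI.1 (by simp)
            have ih := ihN m l false (by omega) (by omega) (Or.inl (by
              rw [List.head?_drop, List.getElem?_eq_getElem h, hsp]; simp))
            rw [ih]
            have hdm : l.drop m = ' ' :: l.drop (m + 1) := by
              rw [← hsp]; exact (List.getElem_cons_drop h).symm
            rw [hsp, show step3 ' ' (l.drop (m + 1)) = ' ' :: l.drop (m + 1) from by
              simp [step3]; rw [List.head?_drop] at hnd; exact hnd, ← hdm]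
          | true =>
            rw [if_pos rfl]
            subst hfl
            have hpar1 : (l.drop (m + 1)).head? = some '(' := by
              rcases hInv with hI | hI
              · exact of_decide_eq_true hI.symm
              · exfalso
                have h22 := hI.2.2
                simp only [Nat.add_sub_cancel, List.getElem?_eq_getElem h] at h22
                exact hpar (Option.some.inj h22)
            obtain ⟨t, ht⟩ : ∃ t, l.drop (m + 1) = '(' :: t := by
              cases hd : l.drop (m + 1) with
              | nil => rw [hd] at hpar1; cases hpar1
              | cons x t => rw [hd] at hpar1; exact ⟨t, by rw [Option.some.inj hpar1]⟩
            have hm2 : m + 2 ≤ l.length := by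
              have hlt := congrArg List.length ht
              simp [List.length_drop] at hlt
              omega
            have hl' : l.eraseIdx m = l.take m ++ '(' :: t := by
              rw [List.eraseIdx_eq_take_drop_succ, ht]
            have hlen : (l.take m).length = m := by rw [List.length_take]; omega
            have ih := ihN (m + 1) (l.eraseIdx m) true
              (by simp [List.length_eraseIdx, h]; omega)
              (by simp [List.length_eraseIdx, h]; omega)
              (Or.inr ⟨rfl, by omega, by
                rw [hl']
                simp only [Nat.add_sub_cancel]
                rw [List.getElem?_append_right (by rw [hlen])]
                rw [hlen, Nat.sub_self]
                rfl⟩)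
            rw [show (m : Int) = ((m + 1 : Nat) : Int) - 1 from by push_cast; ring, ih]
            have htake : (l.eraseIdx m).take (m + 1) = l.take m ++ ['('] := by
              rw [hl', show m + 1 = (l.take m).length + 1 from by rw [hlen],
                List.take_length_add_append]
              simp
            have hdrop : (l.eraseIdx m).drop (m + 1) = t := by
              rw [hl', show m + 1 = (l.take m).length + 1 from by rw [hlen],
                List.drop_length_add_append]
              simp
            rw [htake, hdrop, List.foldr_append]
            simp only [List.foldr_cons, List.foldr_nil]
            rw [hsp, ht, show step3 ' ' ('(' :: t) = '(' :: t from by simp [step3],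
              show step3 '(' t = '(' :: t from by simp [step3]]
        · rw [if_neg hsp]
          have ih := ihN m l false (by omega) (by omega) (Or.inl (by
            rw [List.head?_drop, List.getElem?_eq_getElem h]
            simp [hpar]))
          rw [ih]
          have hdm : l.drop m = l[m] :: l.drop (m + 1) := (List.getElem_cons_drop h).symm
          rw [show step3 l[m] (l.drop (m + 1)) = l[m] :: l.drop (m + 1) from by
            simp [step3, hsp], ← hdm]

theorem loopA3_init : ∀ l : List Char, loopA3 l ((l.length : Int) - 1) false = W l := by
  intro l
  have := loopA3_eq (l.length + l.length) l.length l false (by omega) (le_refl _)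
    (Or.inl (by simp))
  rw [this]
  simp [W]

theorem cond4_iff (l : List Char) (i : Nat) :
    (i + 1 < l.length ∧ l[i]? = some ' ' ∧ l[i + 1]! = ' ') ↔
      (l[i]? = some ' ' ∧ (l.drop (i + 1)).head? = some ' ') := by
  rw [List.head?_drop]
  constructor
  · rintro ⟨h1, h2, h3⟩
    exact ⟨h2, by rw [List.getElem?_eq_getElem h1, ← getElem!_pos l (i + 1) h1, h3]⟩
  · rintro ⟨h2, h3⟩
    have h1 : i + 1 < l.length := by
      by_contra hh
      rw [List.getElem?_eq_none (by omega)] at h3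
      cases h3
    refine ⟨h1, h2, ?_⟩
    rw [getElem!_pos l (i + 1) h1]
    have h4 := h3
    rw [List.getElem?_eq_getElem h1] at h4
    exact Option.some.inj h4

theorem loopA4_eq : ∀ (l : List Char) (i : Nat) (flag : Bool),
    loopA4 l i flag = l.take i ++ f4 flag (l.drop i) := by
  intro l i flag
  induction l, i, flag using loopA4.induct with
  | case1 l i flag h hc ih =>
    rw [loopA4]
    simp only [dif_pos h, if_pos hc]
    have hstep : f4 flag (l.drop i) = l[i] :: f4 true (l.drop (i + 1)) := by
      rw [← List.getElem_cons_drop h]; simp [f4, hc]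
    rw [ih, hstep, List.take_succ_eq_append_getElem h, List.append_assoc]
    rfl
  | case2 l i h hc h2 ih =>
    rw [loopA4]
    simp only [dif_pos h, if_neg hc, dif_pos h2, if_pos rfl]
    have hsp' : l[i] = ' ' := h2.2.1
    have hh : (l.drop (i + 1)).head? = some ' ' := by
      rw [List.head?_drop, List.getElem?_eq_getElem h2.1, ← getElem!_pos l (i + 1) h2.1, h2.2.2]
    have hstep : f4 true (l.drop i) = f4 true (l.drop (i + 1)) := by
      rw [← List.getElem_cons_drop h]
      simp [f4, hc, hsp', hh]
    rw [ih, take_erase l i h, drop_erase l i h, hstep]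
    rfl
  | case3 l i flag h hc h2 hf ih =>
    simp only [Bool.not_eq_true] at hf; subst hf
    rw [loopA4]
    simp only [dif_pos h, if_neg hc, dif_pos h2, Bool.false_eq_true, if_neg (by simp : ¬False)]
    have hsp' : l[i] = ' ' := h2.2.1
    have hh : (l.drop (i + 1)).head? = some ' ' := by
      rw [List.head?_drop, List.getElem?_eq_getElem h2.1, ← getElem!_pos l (i + 1) h2.1, h2.2.2]
    have hstep : f4 false (l.drop i) = l[i] :: f4 false (l.drop (i + 1)) := by
      rw [← List.getElem_cons_drop h]
      simp [f4, hc, hsp', hh]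
    rw [ih, hstep, List.take_succ_eq_append_getElem h, List.append_assoc]
    rfl
  | case4 l i flag h hc h2 ih =>
    rw [loopA4]
    simp only [dif_pos h, if_neg hc, dif_neg h2]
    have hns : ¬(l[i] = ' ' ∧ (l.drop (i + 1)).head? = some ' ') := by
      rintro ⟨ha, hb⟩
      have hced := (cond4_iff l i).mpr ⟨by simp [List.getElem?_eq_getElem h, ha], hb⟩
      rw [List.getElem?_eq_getElem h] at hced
      exact h2 ⟨hced.1, Option.some.inj hced.2.1, hced.2.2⟩
    have hstep : f4 flag (l.drop i) = l[i] :: f4 false (l.drop (i + 1)) := by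
      rw [← List.getElem_cons_drop h]
      simp [f4, hc]
      intro ha hb
      exact absurd ⟨ha, by rw [List.head?_drop, hb]⟩ hns
    rw [ih, hstep, List.take_succ_eq_append_getElem h, List.append_assoc]
    rfl
  | case5 l i flag h =>
    rw [loopA4]
    simp only [dif_neg h]
    rw [List.drop_of_length_le (by omega), List.take_of_length_le (by omega)]
    simp [f4]

theorem f4_id : ∀ (l : List Char) (flag : Bool), noDS l → f4 flag l = l := by
  intro l
  induction l with
  | nil => intro flag _; rfl
  | cons c r ih =>
    intro flag h
    have hr := noDS_tail c r h
    by_cases hb : c = '\\'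
    · simp [f4, hb, ih true hr]
    · have hns : ¬(c = ' ' ∧ r.head? = some ' ') := by
        rintro ⟨hc, hh⟩
        cases r with
        | nil => simp at hh
        | cons d t =>
          simp only [List.head?_cons, Option.some.injEq] at hh
          exact h.1 ⟨hc, hh⟩
      simp [f4, hb, hns, ih false hr]

theorem altStep_skip (out : List Char)
    (h : out.getLast? = some ' ' ∨ out.getLast? = some ')') : altStep out ' ' = out := by
  have hne : out ≠ [] := by
    rcases h with h | h <;> (intro hn; subst hn; simp at h)
  simp [altStep, hne, h]

theorem noDS_append_pair : ∀ (u v : List Char), noDS (u ++ ' ' :: ' ' :: v) → False := by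
  intro u
  induction u with
  | nil => intro v h; exact h.1 ⟨rfl, rfl⟩
  | cons a u' ih =>
    intro v h
    exact ih v (noDS_tail a _ h)

theorem key_step : ∀ (m : List Char), noDS m → ∀ c : Char,
    altStep (W (f2 false m)) c =
      W (f2 false (if m.getLast? = some ' ' ∧ c = ' ' then m else m ++ [c])) := by
  intro m hm c
  by_cases hc : c = ' '
  · subst hc
    by_cases hml : m.getLast? = some ' '
    · rw [if_pos ⟨hml, rfl⟩]
      obtain ⟨m', rfl⟩ := List.getLast?_eq_some_iff.mp hml
      cases hm' : m'.getLast? with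
      | none =>
        have hnil : m' = [] := List.getLast?_eq_none_iff.mp hm'
        subst hnil
        decide
      | some y =>
        obtain ⟨m'', rfl⟩ := List.getLast?_eq_some_iff.mp hm'
        have hyne : y ≠ ' ' := by
          intro hy
          subst hy
          exact noDS_append_pair m'' [] (by simpa using hm)
        rw [f2_append, endF_last (m'' ++ [y]) false y List.getLast?_concat hyne]
        by_cases hy : y = ')'
        · rw [show (if (' ' : Char) = ' ' ∧ decide (y = ')') = true then ([] : List Char)
              else [' ']) = [] from by simp [hy]]
          rw [List.append_nil]
          have hkl : (f2 false (m'' ++ [y])).getLast? = some ')' :=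
            f2_last _ false ')' (by decide) (by rw [hy] at *; exact List.getLast?_concat)
          exact altStep_skip _ (Or.inr (W_last _ ')' (by decide) hkl))
        · rw [show (if (' ' : Char) = ' ' ∧ decide (y = ')') = true then ([] : List Char)
              else [' ']) = [' '] from by simp [hy]]
          rw [W_append_ne _ ' ' (by decide)]
          exact altStep_skip _ (Or.inl List.getLast?_concat)
    · rw [if_neg (fun hcon => hml hcon.1), f2_append]
      cases hml2 : m.getLast? with
      | none =>
        have hnil : m = [] := List.getLast?_eq_none_iff.mp hml2
        subst hnil
        decide
      | some x =>
        have hx : x ≠ ' ' := fun hxx => hml (hxx ▸ hml2)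
        rw [endF_last m false x hml2 hx]
        have hkl := f2_last m false x hx hml2
        have hwl := W_last _ x hx hkl
        by_cases hxp : x = ')'
        · rw [show (if (' ' : Char) = ' ' ∧ decide (x = ')') = true then ([] : List Char)
              else [' ']) = [] from by simp [hxp]]
          rw [List.append_nil]
          exact altStep_skip _ (Or.inr (hxp ▸ hwl))
        · rw [show (if (' ' : Char) = ' ' ∧ decide (x = ')') = true then ([] : List Char)
              else [' ']) = [' '] from by simp [hxp]]
          rw [W_append_ne _ ' ' (by decide)]
          have hne : W (f2 false m) ≠ [] := by
            intro hcon
            rw [hcon] at hwl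
            simp at hwl
          have hskip : ¬((W (f2 false m)).getLast? = some ' ' ∨
              (W (f2 false m)).getLast? = some ')') := by
            rw [hwl]
            simp only [Option.some.injEq]
            rintro (h | h)
            · exact hx h
            · exact hxp h
          simp [altStep, hne, hskip]
  · rw [if_neg (fun hcon => hc hcon.2), f2_append]
    rw [show (if c = ' ' ∧ endF false m then ([] : List Char) else [c]) = [c] from by simp [hc]]
    by_cases hcp : c = '('
    · subst hcp
      rw [W_append_paren _ (noDS_f2 m false hm)]
      simp [altStep]
    · rw [W_append_ne _ c hcp]
      have hns : ¬(c = '(' ∧ (W (f2 false m)).getLast? = some ' ') := fun hcon => hcp hcon.1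
      simp [altStep, hc, hns]

theorem B_eq_W : ∀ p : List Char, p.foldl altStep [] = W (f2 false (collapse p)) := by
  intro p
  induction p using List.reverseRecOn with
  | nil => rfl
  | append_singleton p c ih =>
    rw [List.foldl_append, List.foldl_cons, List.foldl_nil, ih, collapse_append p c,
      key_step (collapse p) (noDS_collapse p) c]

-- ===== VERDICT (by name: the statement is the Claim_ definition above) =====
theorem remove_excess_spaces_spec : Claim_equal_remove_excess_spaces := by
  intro s _
  show remove_excess_spaces s = remove_excess_spaces_alt s
  unfold remove_excess_spaces remove_excess_spaces_alt
  simp only [phase1_toList, loopA2_eq, loopA4_eq, List.take_zero, List.drop_zero,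
    List.nil_append, loopA3_init, B_eq_W]
  rw [f4_id _ false (noDS_W _ (noDS_f2 _ false (noDS_collapse _)))]
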